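-- pv_equiv track=rewrite | github.com/jbax7635/ForexTraderPython | calculateSlopes.py | square_off_array
-- ===== SOURCE A (Python) =====
-- def square_off_array(SMAlist):
--     returnable_array = []
--     for i in range(len(SMAlist)):
--         size = 0
--         array = []
--         for x in range(len(SMAlist[i])):
--             if len(SMAlist[i][x]) > size:
--                 size = len(SMAlist[i][x])
--         for y in range(len(SMAlist[i])):
--             if len(SMAlist[i][y]) == size:
--                 array.append(SMAlist[i][y])
--         returnable_array.append(array)
--     return returnable_array
-- ===== SOURCE B (Python) =====
-- def keep_longest(group):
--     buckets = {}
--     for x in group: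
--         buckets.setdefault(len(x), []).append(x)
--     return buckets[max(buckets)] if buckets else []
--
--
-- def square_off_array(SMAlist):
--     return [keep_longest(group) for group in SMAlist]
-- ===== Notes on version B (the rewrite author's own statement) =====
-- stated objective: alternative
-- what changed: Instead of A's two scans per group (one to find the max inner length, one to filter for it), B buckets each group's inner lists into a dict keyed by length in one pass and returns the bucket of the maximum key (empty dict -> []).
import Mathlib
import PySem

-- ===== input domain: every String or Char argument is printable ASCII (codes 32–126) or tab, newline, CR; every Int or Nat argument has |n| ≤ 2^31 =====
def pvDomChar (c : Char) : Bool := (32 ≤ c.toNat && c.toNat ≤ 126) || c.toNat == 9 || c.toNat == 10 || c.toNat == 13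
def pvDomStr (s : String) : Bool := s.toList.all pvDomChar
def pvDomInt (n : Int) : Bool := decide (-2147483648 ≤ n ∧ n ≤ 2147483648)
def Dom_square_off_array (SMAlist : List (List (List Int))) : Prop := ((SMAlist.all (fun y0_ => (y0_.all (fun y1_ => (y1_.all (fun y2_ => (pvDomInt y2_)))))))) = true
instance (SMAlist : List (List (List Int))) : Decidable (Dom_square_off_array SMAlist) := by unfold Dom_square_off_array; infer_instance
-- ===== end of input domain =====

-- B replaces A's two scans per group (find max length, then filter) by one bucketing pass
-- into a dict keyed by length, returning the bucket of the maximum key; same cost class.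

-- ===== PORT A =====
-- A: per group, first loop computes size = max inner length, second loop appends the
-- inner lists of exactly that length; each group's result is appended to the output.
def square_off_array (SMAlist : List (List (List Int))) : List (List (List Int)) :=
  SMAlist.foldl (fun returnable_array g =>
    let size := g.foldl (fun s x => if x.length > s then x.length else s) 0
    let array := g.foldl (fun a x => if x.length == size then a ++ [x] else a)
      ([] : List (List Int))
    returnable_array ++ [array]) []

-- ===== PORT B =====
-- B helper: bucket the inner lists by length (insertion order), return the max-key bucket.
def keep_longest (group : List (List Int)) : List (List Int) :=
  let buckets : PySem.Dict Int (List (List Int)) :=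
    group.foldl (fun d x => d.modify (PySem.List.len x) [] (fun l => l ++ [x]))
      PySem.Dict.empty
  match PySem.List.max? buckets.keys (fun k => k) with
  | some m => buckets.getD m []
  | none => []

def square_off_array_alt (SMAlist : List (List (List Int))) : List (List (List Int)) :=
  SMAlist.map keep_longest

-- ===== PRECONDITION & SPEC =====
def Spec_square_off_array (SMAlist : List (List (List Int))) (out : List (List (List Int))) : Prop := out = square_off_array_alt SMAlist
instance (SMAlist : List (List (List Int))) (out : List (List (List Int))) : Decidable (Spec_square_off_array SMAlist out) := by unfold Spec_square_off_array; infer_instance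

-- ===== CLAIM (what is proved, stated in full; the proofs are below) =====
def Claim_equal_square_off_array : Prop := ∀ (SMAlist : List (List (List Int))), Dom_square_off_array SMAlist → Spec_square_off_array SMAlist (square_off_array SMAlist)

-- ===== LEMMAS AND PROOFS =====

-- max length of a group, as A's first loop computes it (general initial value for induction)
def pvMx (s : Nat) (g : List (List Int)) : Nat :=
  g.foldl (fun s x => if x.length > s then x.length else s) s

theorem pvMx_bounds (g : List (List Int)) : ∀ s : Nat,
    s ≤ pvMx s g ∧ ∀ x ∈ g, x.length ≤ pvMx s g := by
  induction g with
  | nil => intro s; simp [pvMx]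
  | cons y t ih =>
    intro s
    have h := ih (if y.length > s then y.length else s)
    constructor
    · refine le_trans ?_ h.1; split <;> omega
    · intro x hx
      rcases List.mem_cons.mp hx with rfl | hx
      · refine le_trans ?_ h.1; split <;> omega
      · exact h.2 x hx

theorem pvMx_attained (g : List (List Int)) : ∀ s : Nat,
    pvMx s g = s ∨ ∃ x ∈ g, x.length = pvMx s g := by
  induction g with
  | nil => intro s; left; rfl
  | cons y t ih =>
    intro s
    have hstep : pvMx s (y :: t) = pvMx (if y.length > s then y.length else s) t := rfl
    rcases ih (if y.length > s then y.length else s) with h | ⟨x, hx, hlx⟩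
    · by_cases hy : y.length > s
      · right; exact ⟨y, List.mem_cons_self, by rw [hstep, h]; simp [hy]⟩
      · left; rw [hstep, h]; simp [hy]
    · right; exact ⟨x, List.mem_cons_of_mem _ hx, by rw [hstep, ← hlx]⟩

-- B's per-group bucket at the maximum key is exactly A's per-group filter
theorem pvKeepLongest_eq (g : List (List Int)) :
    keep_longest g = g.filter (fun x => x.length == pvMx 0 g) := by
  cases g with
  | nil => rfl
  | cons y t =>
    unfold keep_longest
    have hfold : (y :: t).foldl
        (fun (d : PySem.Dict Int (List (List Int))) x =>
          d.modify (PySem.List.len x) [] (fun l => l ++ [x])) PySem.Dict.empty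
      = ((y :: t).map (fun x => (PySem.List.len x, x))).foldl
          (fun d p => d.modify p.1 [] (fun l => l ++ [p.2])) PySem.Dict.empty := by
      rw [List.foldl_map]
    have hkeys : ((y :: t).foldl
        (fun (d : PySem.Dict Int (List (List Int))) x =>
          d.modify (PySem.List.len x) [] (fun l => l ++ [x])) PySem.Dict.empty).keys
      = PySem.Set.ofList ((y :: t).map PySem.List.len) := by
      rw [PySem.Dict.keys_foldl_modify_key (y :: t) PySem.List.len []
        (fun _ x => fun l => l ++ [x]) PySem.Dict.empty, PySem.Dict.keys_empty,
        PySem.Set.update_nil_left]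
    have hne : PySem.Set.ofList ((y :: t).map PySem.List.len) ≠ [] := by
      intro h
      have : PySem.List.len y ∈ PySem.Set.ofList ((y :: t).map PySem.List.len) := by
        rw [PySem.Set.mem_ofList]; simp
      rw [h] at this; exact absurd this (List.not_mem_nil)
    -- the max over the keys exists
    rcases hm : PySem.List.max? ((y :: t).foldl
        (fun (d : PySem.Dict Int (List (List Int))) x =>
          d.modify (PySem.List.len x) [] (fun l => l ++ [x])) PySem.Dict.empty).keys
        (fun k => k) with _ | m
    · exfalso
      rw [PySem.List.max?_eq_none_iff, hkeys] at hm
      exact hne hm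
    · simp only [hm]
      -- m is the maximum length, so m = pvMx 0 (y :: t)
      have hmem := PySem.List.max?_mem hm
      have hmax := PySem.List.max?_isMax hm
      rw [hkeys, PySem.Set.mem_ofList] at hmem
      have hmx_eq : m = ((pvMx 0 (y :: t) : Nat) : Int) := by
        rcases List.mem_map.mp hmem with ⟨x, hx, hlx⟩
        have h1 : x.length ≤ pvMx 0 (y :: t) := (pvMx_bounds (y :: t) 0).2 x hx
        rcases pvMx_attained (y :: t) 0 with h0 | ⟨z, hz, hlz⟩
        · -- pvMx = 0: every length ≤ 0, in particular x.length = 0 = pvMx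
          subst hlx; simp [PySem.List.len_eq]; omega
        · have h2 : ((PySem.List.len z : Int)) ≤ m := by
            apply hmax
            rw [hkeys, PySem.Set.mem_ofList]
            exact List.mem_map_of_mem hz
          subst hlx
          simp only [PySem.List.len_eq] at h2 ⊢
          omega
      -- the bucket at key m is the filter by length m
      rw [hfold, hmx_eq]
      have hbucket := PySem.Dict.getD_foldl_modify_append
        ((y :: t).map (fun x => (PySem.List.len x, x))) PySem.Dict.empty
        ((pvMx 0 (y :: t) : Nat) : Int)
      rw [hbucket]
      simp only [PySem.Dict.getD_empty, List.nil_append, List.filter_map]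
      rw [List.map_map]
      have hfe : ∀ x : List Int,
          ((fun p : Int × List Int => p.1 == ((pvMx 0 (y :: t) : Nat) : Int)) ∘
            (fun x => (PySem.List.len x, x))) x
          = (x.length == pvMx 0 (y :: t)) := by
        intro x
        simp [PySem.List.len_eq]
      rw [List.filter_congr (fun x _ => hfe x)]
      simp [Function.comp_def]

-- ===== VERDICT (by name: the statement is the Claim_ definition above) =====
theorem square_off_array_spec : Claim_equal_square_off_array := by
  intro SMAlist _
  show square_off_array SMAlist = square_off_array_alt SMAlist
  unfold square_off_array square_off_array_alt
  rw [PySem.List.foldl_append_singleton_eq_map, List.nil_append]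
  refine List.map_congr_left (fun g _ => ?_)
  show (g.foldl (fun a x => if x.length == pvMx 0 g then a ++ [x] else a)
      ([] : List (List Int))) = keep_longest g
  rw [PySem.List.foldl_append_if_eq_filter (fun x => x.length == pvMx 0 g) g [],
    List.nil_append, pvKeepLongest_eq]
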